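-- pv_equiv track=rewrite | github.com/ahmedarafa994/chimera | tests/security/test_security_scenarios.py | _detect_dangerous_pattern
-- ===== SOURCE A (Python) =====
-- def _detect_dangerous_pattern(prompt: str) -> bool:
--     """Detect dangerous patterns in prompts."""
--     patterns = [
--         "ignore all previous",
--         "developer mode",
--         "no restrictions",
--         "without safety",
--     ]
--     prompt_lower = prompt.lower()
--     return any(p in prompt_lower for p in patterns)
-- ===== SOURCE B (Python) =====
-- def _detect_dangerous_pattern(prompt: str) -> bool:
--     """Detect dangerous patterns in prompts (single left-to-right scan)."""
--     patterns = (
--         "ignore all previous",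
--         "developer mode",
--         "no restrictions",
--         "without safety",
--     )
--     s = prompt.lower()
--     for i in range(len(s)):
--         for p in patterns:
--             if s.startswith(p, i):
--                 return True
--     return False
-- ===== Notes on version B (the rewrite author's own statement) =====
-- stated objective: alternative
-- what changed: Replaces four independent whole-string substring membership tests with one explicit left-to-right scan that checks at each position whether any of the four phrases starts there.
import Mathlib
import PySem

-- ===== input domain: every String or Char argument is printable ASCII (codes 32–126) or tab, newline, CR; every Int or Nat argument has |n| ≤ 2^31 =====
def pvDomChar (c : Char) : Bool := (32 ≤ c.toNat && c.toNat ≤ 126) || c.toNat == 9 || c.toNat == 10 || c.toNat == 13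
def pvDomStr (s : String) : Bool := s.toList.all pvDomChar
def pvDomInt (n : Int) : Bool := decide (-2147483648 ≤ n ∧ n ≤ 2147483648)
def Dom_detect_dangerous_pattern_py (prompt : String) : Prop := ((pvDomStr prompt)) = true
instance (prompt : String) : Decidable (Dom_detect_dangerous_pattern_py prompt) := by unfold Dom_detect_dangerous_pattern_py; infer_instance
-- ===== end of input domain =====

-- B replaces A's four independent substring-membership tests with one explicit left-to-right
-- scan checking at each position whether any phrase starts there (objective: alternative).

-- ===== PORT A =====
def detect_dangerous_pattern_py (prompt : String) : Bool :=
  let patterns : List String :=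
    ["ignore all previous", "developer mode", "no restrictions", "without safety"]
  let prompt_lower := PySem.Str.lower prompt
  patterns.any (fun p => PySem.Str.isIn p prompt_lower)

-- ===== PORT B =====
-- the four phrases, as char lists (B's tuple of patterns)
def dpAltPats : List (List Char) :=
  ["ignore all previous".toList, "developer mode".toList,
   "no restrictions".toList, "without safety".toList]

-- B's nested loop: for each position i (here: each suffix), check each pattern with startswith
def dpAltScan (pats : List (List Char)) : List Char → Bool
  | [] => false
  | c :: rest => pats.any (fun p => p.isPrefixOf (c :: rest)) || dpAltScan pats rest

def detect_dangerous_pattern_py_alt (prompt : String) : Bool :=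
  dpAltScan dpAltPats (PySem.Str.lower prompt).toList

-- ===== PRECONDITION & SPEC =====
def Spec_detect_dangerous_pattern_py (prompt : String) (out : Bool) : Prop := out = detect_dangerous_pattern_py_alt prompt
instance (prompt : String) (out : Bool) : Decidable (Spec_detect_dangerous_pattern_py prompt out) := by unfold Spec_detect_dangerous_pattern_py; infer_instance

-- ===== CLAIM (what is proved, stated in full; the proofs are below) =====
def Claim_equal_detect_dangerous_pattern_py : Prop := ∀ (prompt : String), Dom_detect_dangerous_pattern_py prompt → Spec_detect_dangerous_pattern_py prompt (detect_dangerous_pattern_py prompt)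

-- ===== LEMMAS AND PROOFS =====

theorem dpAltScan_eq_true_iff (pats : List (List Char)) (hne : ∀ p ∈ pats, p ≠ [])
    (l : List Char) : dpAltScan pats l = true ↔ ∃ p ∈ pats, p <:+: l := by
  induction l with
  | nil =>
    simp only [dpAltScan]
    constructor
    · intro h; exact absurd h (by simp)
    · rintro ⟨p, hp, hinf⟩
      exact absurd (List.eq_nil_of_infix_nil hinf) (hne p hp)
  | cons c rest ih =>
    simp only [dpAltScan, Bool.or_eq_true, List.any_eq_true, ih]
    constructor
    · rintro (⟨p, hp, hpre⟩ | ⟨p, hp, hinf⟩)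
      · exact ⟨p, hp, (List.IsPrefix.isInfix (List.isPrefixOf_iff_prefix.mp hpre))⟩
      · exact ⟨p, hp, hinf.trans (List.suffix_cons c rest).isInfix⟩
    · rintro ⟨p, hp, hinf⟩
      rcases List.infix_cons_iff.mp hinf with hpre | hinf'
      · exact Or.inl ⟨p, hp, List.isPrefixOf_iff_prefix.mpr hpre⟩
      · exact Or.inr ⟨p, hp, hinf'⟩

theorem detect_dangerous_pattern_py_eq (prompt : String) :
    detect_dangerous_pattern_py prompt = detect_dangerous_pattern_py_alt prompt := by
  unfold detect_dangerous_pattern_py detect_dangerous_pattern_py_alt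
  rw [Bool.eq_iff_iff]
  rw [dpAltScan_eq_true_iff dpAltPats (by decide) _]
  simp only [List.any_eq_true, PySem.Str.isIn_iff_infix, dpAltPats]
  constructor
  · rintro ⟨p, hp, h⟩
    fin_cases hp <;> exact ⟨_, by decide, h⟩
  · rintro ⟨p, hp, h⟩
    fin_cases hp <;> exact ⟨_, by decide, h⟩

-- ===== VERDICT (by name: the statement is the Claim_ definition above) =====
theorem detect_dangerous_pattern_py_spec : Claim_equal_detect_dangerous_pattern_py := by
  intro prompt _
  exact detect_dangerous_pattern_py_eq prompt
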